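-- pv_equiv track=rewrite | github.com/JiJiHoon/study-algorithm | boj/workbook/widerplanet/5/2579/main.py | solve
-- ===== SOURCE A (Python) =====
-- def solve(data):
--     if len(data) == 1:
--         return data[0]
--     n = len(data)
--
--     one_step = [0] * n
--     two_step = [0] * n
--
--     one_step[0] = data[0]
--     one_step[1] = data[0] + data[1]
--     two_step[1] = data[1]
--
--     for i in range(2, n):
--         one_step[i] = two_step[i - 1] + data[i]
--         two_step[i] = max(one_step[i - 2], two_step[i - 2]) + data[i]
--
--     return max(one_step[n - 1], two_step[n - 1])
-- ===== SOURCE B (Python) =====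
-- def solve(data):
--     n = len(data)
--     if n == 1:
--         return data[0]
--     # rolling window of the combined best-at-stair values; O(1) extra space,
--     # single merged recurrence instead of two parallel arrays
--     p3, p2, p1 = 0, max(data[0], 0), max(data[0] + data[1], data[1])
--     for i in range(2, n):
--         p3, p2, p1 = p2, p1, max(p3 + data[i - 1], p2) + data[i]
--     return p1
-- ===== Notes on version B (the rewrite author's own statement) =====
-- stated objective: alternative
-- what changed: Replaces the two full-length DP arrays (one_step/two_step, indexed reads two back) with a single merged best-at-stair recurrence kept in three rolling scalars, so no arrays are allocated or indexed and only one value is computed per stair.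
import Mathlib
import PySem

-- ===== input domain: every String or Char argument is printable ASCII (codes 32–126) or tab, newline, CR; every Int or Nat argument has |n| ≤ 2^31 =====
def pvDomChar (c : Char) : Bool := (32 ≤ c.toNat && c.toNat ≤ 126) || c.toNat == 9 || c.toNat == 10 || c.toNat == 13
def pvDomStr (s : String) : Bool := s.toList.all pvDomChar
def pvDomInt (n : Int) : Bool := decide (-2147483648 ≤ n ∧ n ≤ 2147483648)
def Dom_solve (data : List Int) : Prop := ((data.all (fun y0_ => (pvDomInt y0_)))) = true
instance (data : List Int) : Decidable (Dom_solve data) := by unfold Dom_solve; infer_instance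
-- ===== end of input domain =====

-- B replaces A's two full-length DP arrays by one merged recurrence kept in three
-- rolling scalars (O(1) extra space); same return value on every non-empty list.

-- ===== PORT A =====
-- loop body of A's 'for i in range(2, n)'
def solveStep (data : List Int) (st : List Int × List Int) (i : Int) : List Int × List Int :=
  let one_step := PySem.List.pySetD st.1 i
      (PySem.List.pyGetD st.2 (i - 1) 0 + PySem.List.pyGetD data i 0)
  let two_step := PySem.List.pySetD st.2 i
      (max (PySem.List.pyGetD one_step (i - 2) 0) (PySem.List.pyGetD st.2 (i - 2) 0)
        + PySem.List.pyGetD data i 0)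
  (one_step, two_step)

def solve (data : List Int) : Int :=
  if data.length = 1 then PySem.List.pyGetD data 0 0
  else
    let n : Int := data.length
    let one_step := PySem.List.pySetD (PySem.List.pySetD
        (List.replicate data.length (0 : Int)) 0 (PySem.List.pyGetD data 0 0)) 1
        (PySem.List.pyGetD data 0 0 + PySem.List.pyGetD data 1 0)
    let two_step := PySem.List.pySetD (List.replicate data.length (0 : Int)) 1
        (PySem.List.pyGetD data 1 0)
    let st := (PySem.List.pyRange 2 n 1).foldl (solveStep data) (one_step, two_step)
    max (PySem.List.pyGetD st.1 (n - 1) 0) (PySem.List.pyGetD st.2 (n - 1) 0)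

-- ===== PORT B =====
-- loop body of B's 'for i in range(2, n)': (p3, p2, p1) -> (p2, p1, max(p3+data[i-1], p2)+data[i])
def solveAltStep (data : List Int) (st : Int × Int × Int) (i : Int) : Int × Int × Int :=
  (st.2.1, st.2.2,
    max (st.1 + PySem.List.pyGetD data (i - 1) 0) st.2.1 + PySem.List.pyGetD data i 0)

def solve_alt (data : List Int) : Int :=
  let n : Int := data.length
  if n = 1 then PySem.List.pyGetD data 0 0
  else
    let st := (PySem.List.pyRange 2 n 1).foldl (solveAltStep data)
      (0, max (PySem.List.pyGetD data 0 0) 0,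
        max (PySem.List.pyGetD data 0 0 + PySem.List.pyGetD data 1 0)
          (PySem.List.pyGetD data 1 0))
    st.2.2

-- ===== PRECONDITION & SPEC =====
-- Pre_ excludes only the empty list, on which the Python A raises IndexError (data[0]).
def Pre_solve (data : List Int) : Prop := data ≠ []
instance (data : List Int) : Decidable (Pre_solve data) := by unfold Pre_solve; infer_instance
def pvWitness_solve : List Int := [10, 20, 15, 25, 10, 20]

def Spec_solve (data : List Int) (out : Int) : Prop := out = solve_alt data
instance (data : List Int) (out : Int) : Decidable (Spec_solve data out) := by unfold Spec_solve; infer_instance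

-- ===== CLAIM (what is proved, stated in full; the proofs are below) =====
def Claim_equal_solve : Prop := ∀ (data : List Int), Dom_solve data → Pre_solve data → Spec_solve data (solve data)

-- ===== LEMMAS AND PROOFS =====

-- mathematical description of A's two arrays: (one_step[k], two_step[k])
def fAux (data : List Int) : Nat → Int × Int
  | 0 => (data.getD 0 0, 0)
  | 1 => (data.getD 0 0 + data.getD 1 0, data.getD 1 0)
  | (k + 2) =>
      ((fAux data (k + 1)).2 + data.getD (k + 2) 0,
        max (fAux data k).1 (fAux data k).2 + data.getD (k + 2) 0)

-- B's rolling value: E (k+1) = max(one_step[k], two_step[k]); E 0 = 0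
def eAux (data : List Int) : Nat → Int
  | 0 => 0
  | (k + 1) => max (fAux data k).1 (fAux data k).2

theorem getD_set_int (xs : List Int) (n j : Nat) (v d : Int) (hn : n < xs.length) :
    (xs.set n v).getD j d = if j = n then v else xs.getD j d := by
  by_cases h : j = n
  · subst h; simp [List.getD_eq_getElem?_getD, hn]
  · rw [if_neg h]
    simp [List.getD_eq_getElem?_getD, List.getElem?_set_ne (by omega : n ≠ j)]

theorem ftwo_eq (data : List Int) (j : Nat) :
    (fAux data (j + 1)).2 = eAux data j + data.getD (j + 1) 0 := by
  cases j with
  | zero => simp [fAux, eAux]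
  | succ k => simp [fAux, eAux]

theorem eAux_step (data : List Int) (k : Nat) :
    eAux data (k + 3) =
      max (eAux data k + data.getD (k + 1) 0) (eAux data (k + 1)) + data.getD (k + 2) 0 := by
  show max (fAux data (k + 2)).1 (fAux data (k + 2)).2 = _
  have h1 : (fAux data (k + 2)).1 = (fAux data (k + 1)).2 + data.getD (k + 2) 0 := rfl
  have h2 : (fAux data (k + 2)).2 = eAux data (k + 1) + data.getD (k + 2) 0 := rfl
  rw [h1, h2, ftwo_eq, Int.max_add_right]

-- invariant of A's loop state
def InvA (data : List Int) (m : Nat) (st : List Int × List Int) : Prop :=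
  st.1.length = data.length ∧ st.2.length = data.length ∧
    ∀ j : Nat, j < m →
      st.1.getD j 0 = (fAux data j).1 ∧ st.2.getD j 0 = (fAux data j).2

theorem solveStep_inv (data : List Int) (m : Nat) (st : List Int × List Int)
    (h2 : 2 ≤ m) (hm : m < data.length) (hinv : InvA data m st) :
    InvA data (m + 1) (solveStep data st (m : Int)) := by
  obtain ⟨st1, st2⟩ := st
  obtain ⟨hl1, hl2, hv⟩ := hinv
  simp only at hl1 hl2 hv
  have hm1 : ((m : Int) - 1) = ((m - 1 : Nat) : Int) := by omega
  have hm2 : ((m : Int) - 2) = ((m - 2 : Nat) : Int) := by omega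
  have hfm1 : (fAux data m).1 = (fAux data (m - 1)).2 + data.getD m 0 := by
    obtain ⟨k, rfl⟩ : ∃ k, m = k + 2 := ⟨m - 2, by omega⟩
    simp [fAux]
  have hfm2 : (fAux data m).2
      = max (fAux data (m - 2)).1 (fAux data (m - 2)).2 + data.getD m 0 := by
    obtain ⟨k, rfl⟩ : ∃ k, m = k + 2 := ⟨m - 2, by omega⟩
    simp [fAux]
  simp only [solveStep, hm1, hm2, PySem.List.pySetD_natCast, PySem.List.pyGetD_natCast]
  refine ⟨by simpa using hl1, by simpa using hl2, ?_⟩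
  intro j hj
  simp only
  constructor
  · rw [getD_set_int _ _ _ _ _ (by omega : m < st1.length)]
    by_cases hje : j = m
    · rw [if_pos hje, hje, (hv (m - 1) (by omega)).2, hfm1]
    · rw [if_neg hje]
      exact (hv j (by omega)).1
  · rw [getD_set_int _ _ _ _ _ (by omega : m < st2.length)]
    by_cases hje : j = m
    · rw [if_pos hje, getD_set_int _ _ _ _ _ (by omega : m < st1.length),
        if_neg (by omega : ¬ (m - 2) = m), (hv (m - 2) (by omega)).1,
        (hv (m - 2) (by omega)).2, hje, hfm2]
    · rw [if_neg hje]
      exact (hv j (by omega)).2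

-- A's loop, characterised
theorem foldA (data : List Int) (hn : 2 ≤ data.length) :
    ∀ m : Nat, 2 ≤ m → m ≤ data.length →
      InvA data m
        ((PySem.List.pyRange 2 (m : Int) 1).foldl (solveStep data)
          (PySem.List.pySetD (PySem.List.pySetD (List.replicate data.length (0 : Int)) 0
              (PySem.List.pyGetD data 0 0)) 1
              (PySem.List.pyGetD data 0 0 + PySem.List.pyGetD data 1 0),
            PySem.List.pySetD (List.replicate data.length (0 : Int)) 1
              (PySem.List.pyGetD data 1 0))) := by
  have hg0 : PySem.List.pyGetD data (0 : Int) 0 = data.getD 0 0 := by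
    rw [show (0 : Int) = ((0 : Nat) : Int) by norm_num, PySem.List.pyGetD_natCast]
  have hg1 : PySem.List.pyGetD data (1 : Int) 0 = data.getD 1 0 := by
    rw [show (1 : Int) = ((1 : Nat) : Int) by norm_num, PySem.List.pyGetD_natCast]
  have hs0 : ∀ (xs : List Int) (v : Int), PySem.List.pySetD xs (0 : Int) v = xs.set 0 v := by
    intro xs v
    rw [show (0 : Int) = ((0 : Nat) : Int) by norm_num, PySem.List.pySetD_natCast]
  have hs1 : ∀ (xs : List Int) (v : Int), PySem.List.pySetD xs (1 : Int) v = xs.set 1 v := by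
    intro xs v
    rw [show (1 : Int) = ((1 : Nat) : Int) by norm_num, PySem.List.pySetD_natCast]
  intro m
  induction m with
  | zero => intro h _; omega
  | succ m ih =>
    intro h2 hle
    by_cases hm2 : m < 2
    · -- base case m + 1 = 2 : the loop body has not run yet
      have hmeq : m = 1 := by omega
      subst hmeq
      rw [show ((2 : Nat) : Int) = 2 by norm_num, PySem.List.pyRange_one_eq_nil (by norm_num)]
      simp only [List.foldl_nil, hg0, hg1, hs0, hs1]
      have hrep : (List.replicate data.length (0 : Int)).length = data.length := by simp
      refine ⟨by simp, by simp, ?_⟩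
      intro j hj
      simp only
      have h0s : (0 : Nat) < ((List.replicate data.length (0 : Int)).set 0 (data.getD 0 0)).length := by
        simp; omega
    -- j < 2 : check the two initialised cells
      interval_cases j
      · constructor
        · rw [getD_set_int _ _ _ _ _ (by simpa using (by omega : 1 < data.length)),
            if_neg (by omega : ¬ (0 : Nat) = 1),
            getD_set_int _ _ _ _ _ (by simpa using (by omega : 0 < data.length)),
            if_pos rfl]
          rfl
        · rw [getD_set_int _ _ _ _ _ (by simpa using (by omega : 1 < data.length)),
            if_neg (by omega : ¬ (0 : Nat) = 1)]
          simp [fAux]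
      · constructor
        · rw [getD_set_int _ _ _ _ _ (by simpa using (by omega : 1 < data.length)),
            if_pos rfl]
          rfl
        · rw [getD_set_int _ _ _ _ _ (by simpa using (by omega : 1 < data.length)),
            if_pos rfl]
          rfl
    · -- inductive step: peel the last loop index m
      have hrng : PySem.List.pyRange 2 ((m + 1 : Nat) : Int) 1
          = PySem.List.pyRange 2 (m : Int) 1 ++ [(m : Int)] := by
        have hc : ((m + 1 : Nat) : Int) = (m : Int) + 1 := by push_cast; ring
        rw [hc, PySem.List.pyRange_one_succ_right (by exact_mod_cast (by omega : 2 ≤ m))]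
      rw [hrng, List.foldl_append]
      simp only [List.foldl_cons, List.foldl_nil]
      exact solveStep_inv data m _ (by omega) (by omega) (ih (by omega) (by omega))

-- B's loop, characterised
theorem foldB (data : List Int) :
    ∀ m : Nat, 2 ≤ m →
      (PySem.List.pyRange 2 (m : Int) 1).foldl (solveAltStep data)
        (0, max (PySem.List.pyGetD data 0 0) 0,
          max (PySem.List.pyGetD data 0 0 + PySem.List.pyGetD data 1 0)
            (PySem.List.pyGetD data 1 0))
      = (eAux data (m - 2), eAux data (m - 1), eAux data m) := by
  have hg0 : PySem.List.pyGetD data (0 : Int) 0 = data.getD 0 0 := by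
    rw [show (0 : Int) = ((0 : Nat) : Int) by norm_num, PySem.List.pyGetD_natCast]
  have hg1 : PySem.List.pyGetD data (1 : Int) 0 = data.getD 1 0 := by
    rw [show (1 : Int) = ((1 : Nat) : Int) by norm_num, PySem.List.pyGetD_natCast]
  intro m
  induction m with
  | zero => intro h; omega
  | succ m ih =>
    intro h2
    by_cases hm2 : m < 2
    · have hmeq : m = 1 := by omega
      subst hmeq
      rw [show ((2 : Nat) : Int) = 2 by norm_num, PySem.List.pyRange_one_eq_nil (by norm_num)]
      simp only [List.foldl_nil, hg0, hg1]
      rfl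
    · have hrng : PySem.List.pyRange 2 ((m + 1 : Nat) : Int) 1
          = PySem.List.pyRange 2 (m : Int) 1 ++ [(m : Int)] := by
        have hc : ((m + 1 : Nat) : Int) = (m : Int) + 1 := by push_cast; ring
        rw [hc, PySem.List.pyRange_one_succ_right (by exact_mod_cast (by omega : 2 ≤ m))]
      rw [hrng, List.foldl_append]
      simp only [List.foldl_cons, List.foldl_nil]
      rw [ih (by omega)]
      have hm1 : ((m : Int) - 1) = ((m - 1 : Nat) : Int) := by omega
      simp only [solveAltStep, hm1, PySem.List.pyGetD_natCast]
      obtain ⟨k, rfl⟩ : ∃ k, m = k + 2 := ⟨m - 2, by omega⟩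
      have hstep := eAux_step data k
      simp only [show k + 2 - 2 = k from by omega, show k + 2 - 1 = k + 1 from by omega,
        show k + 2 + 1 - 2 = k + 1 from by omega, show k + 2 + 1 - 1 = k + 2 from by omega,
        show k + 2 + 1 = k + 3 from by omega]
      rw [hstep]

-- ===== VERDICT (by name: the statement is the Claim_ definition above) =====
theorem solve_spec : Claim_equal_solve := by
  intro data _ hpre
  unfold Spec_solve solve solve_alt
  have hlen : 1 ≤ data.length := by
    cases data with
    | nil => exact absurd rfl hpre
    | cons a t => simp
  by_cases h1 : data.length = 1
  · rw [if_pos h1, if_pos (by exact_mod_cast h1)]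
  · have hn2 : 2 ≤ data.length := by omega
    rw [if_neg h1, if_neg (by exact_mod_cast h1)]
    have hA := foldA data hn2 data.length hn2 le_rfl
    have hB := foldB data data.length hn2
    simp only [hB]
    obtain ⟨hl1, hl2, hv⟩ := hA
    have hvn := hv (data.length - 1) (by omega)
    have hcast : ((data.length : Int) - 1) = ((data.length - 1 : Nat) : Int) := by
      omega
    simp only [hcast, PySem.List.pyGetD_natCast, hvn.1, hvn.2]
    obtain ⟨k, hk⟩ : ∃ k, data.length = k + 1 := ⟨data.length - 1, by omega⟩
    rw [hk]
    simp [eAux]
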